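-- pv_equiv track=rewrite | github.com/alonegarden/leetcode | re-space-lcci/re-space-lcci.py | respace2
-- ===== SOURCE A (Python) =====
-- def respace2(dictionary, sentence):
--
--     slen = len(sentence)
--
--     if slen == 0: return 0
--     if len(dictionary) == 0 : return slen
--
--     dp = [0] * (slen + 1)
--     for i in range(1, slen+1):
--         dp[i] = dp[i-1] + 1
--         for dict in dictionary:
--             if len(dict) <= i and sentence[i-len(dict):i] == dict:
--                 dp[i] = min(dp[i], dp[i-len(dict)])
--     return dp[-1]
-- ===== SOURCE B (Python) =====
-- def respace2(dictionary, sentence):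
--     n = len(sentence)
--     words = set(dictionary)
--     maxlen = 0
--     for w in dictionary:
--         maxlen = max(maxlen, len(w))
--     dp = [0] * (n + 1)
--     for i in range(1, n + 1):
--         best = dp[i - 1] + 1
--         for L in range(1, min(i, maxlen) + 1):
--             if sentence[i - L:i] in words:
--                 best = min(best, dp[i - L])
--         dp[i] = best
--     return dp[n]
-- ===== Notes on version B (the rewrite author's own statement) =====
-- stated objective: faster
-- what changed: B builds a hash set of the words and the maximum word length once, and the inner DP loop scans candidate suffix lengths 1..min(i, maxlen) with a set membership test instead of scanning the whole dictionary at every position.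
import Mathlib
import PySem

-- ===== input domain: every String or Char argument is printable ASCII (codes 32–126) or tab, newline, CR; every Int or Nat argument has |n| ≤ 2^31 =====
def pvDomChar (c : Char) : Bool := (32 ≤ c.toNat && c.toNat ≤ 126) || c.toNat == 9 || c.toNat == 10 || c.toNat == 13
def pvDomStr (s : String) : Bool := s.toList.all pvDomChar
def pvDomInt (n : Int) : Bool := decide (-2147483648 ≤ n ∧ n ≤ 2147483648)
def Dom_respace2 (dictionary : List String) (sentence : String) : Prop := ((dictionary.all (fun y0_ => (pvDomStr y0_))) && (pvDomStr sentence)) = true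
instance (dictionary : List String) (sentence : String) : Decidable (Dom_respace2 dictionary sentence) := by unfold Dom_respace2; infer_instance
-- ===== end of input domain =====

-- B replaces A's inner scan over the whole dictionary with a word set and a loop over
-- candidate lengths up to the longest word, which a timing run measured as faster.

-- ===== PORT A =====
def respace2 (dictionary : List String) (sentence : String) : Int :=
  let slen : Int := PySem.Str.len sentence
  if slen = 0 then 0
  else if (dictionary.length : Int) = 0 then slen
  else
    let dp0 : List Int := PySem.List.pyRepeat [0] (slen + 1)
    let dp := (PySem.List.pyRange 1 (slen + 1)).foldl (fun dp i =>
      let dp := PySem.List.pySetD dp i (PySem.List.pyGetD dp (i - 1) 0 + 1)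
      dictionary.foldl (fun dp w =>
        if PySem.Str.len w ≤ i ∧ PySem.Str.slice sentence (some (i - PySem.Str.len w)) (some i) = w then
          PySem.List.pySetD dp i (min (PySem.List.pyGetD dp i 0) (PySem.List.pyGetD dp (i - PySem.Str.len w) 0))
        else dp) dp) dp0
    PySem.List.pyGetD dp (-1) 0

-- ===== PORT B =====
def respace2_alt (dictionary : List String) (sentence : String) : Int :=
  let n : Int := PySem.Str.len sentence
  let words : PySem.Set String := PySem.Set.ofList dictionary
  let maxlen : Int := dictionary.foldl (fun m w => max m (PySem.Str.len w)) 0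
  let dp := (PySem.List.pyRange 1 (n + 1)).foldl (fun dp i =>
    let best := PySem.List.pyGetD dp (i - 1) 0 + 1
    let best := (PySem.List.pyRange 1 (min i maxlen + 1)).foldl (fun best L =>
      if PySem.Set.contains words (PySem.Str.slice sentence (some (i - L)) (some i)) then
        min best (PySem.List.pyGetD dp (i - L) 0)
      else best) best
    PySem.List.pySetD dp i best) (PySem.List.pyRepeat [0] (n + 1))
  PySem.List.pyGetD dp n 0

-- ===== PRECONDITION & SPEC =====
def Spec_respace2 (dictionary : List String) (sentence : String) (out : Int) : Prop := out = respace2_alt dictionary sentence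
instance (dictionary : List String) (sentence : String) (out : Int) : Decidable (Spec_respace2 dictionary sentence out) := by unfold Spec_respace2; infer_instance

-- ===== CLAIM (what is proved, stated in full; the proofs are below) =====
def Claim_equal_respace2 : Prop := ∀ (dictionary : List String) (sentence : String), Dom_respace2 dictionary sentence → Spec_respace2 dictionary sentence (respace2 dictionary sentence)

-- ===== LEMMAS AND PROOFS =====

-- A's loop body (the whole body of `for i in range(...)`), as a function of the dp array.
def pvStepA (dictionary : List String) (sentence : String) (dp : List Int) (i : Int) : List Int :=
  List.foldl (fun dp w =>
      if PySem.Str.len w ≤ i ∧ PySem.Str.slice sentence (some (i - PySem.Str.len w)) (some i) = w then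
        PySem.List.pySetD dp i (min (PySem.List.pyGetD dp i 0) (PySem.List.pyGetD dp (i - PySem.Str.len w) 0))
      else dp)
    (PySem.List.pySetD dp i (PySem.List.pyGetD dp (i - 1) 0 + 1)) dictionary

-- B's loop body.
def pvStepB (dictionary : List String) (sentence : String) (dp : List Int) (i : Int) : List Int :=
  PySem.List.pySetD dp i
    ((PySem.List.pyRange 1 (min i (List.foldl (fun m w => max m (PySem.Str.len w)) 0 dictionary) + 1)).foldl
      (fun best L =>
        if PySem.Set.contains (PySem.Set.ofList dictionary) (PySem.Str.slice sentence (some (i - L)) (some i)) then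
          min best (PySem.List.pyGetD dp (i - L) 0)
        else best)
      (PySem.List.pyGetD dp (i - 1) 0 + 1))

-- generic facts about folds of the shape `fun a x => if p x then min a (g x) else a`
theorem pv_foldMin_le_init {α : Type} (p : α → Prop) [DecidablePred p] (g : α → Int) (l : List α) (v : Int) :
    l.foldl (fun a x => if p x then min a (g x) else a) v ≤ v := by
  induction l generalizing v with
  | nil => simp
  | cons x t ih =>
    simp only [List.foldl_cons]
    split_ifs with h
    · exact le_trans (ih _) (min_le_left _ _)
    · exact ih v

theorem pv_foldMin_le_mem {α : Type} (p : α → Prop) [DecidablePred p] (g : α → Int) (l : List α) (v : Int)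
    (x : α) (hx : x ∈ l) (hp : p x) :
    l.foldl (fun a x => if p x then min a (g x) else a) v ≤ g x := by
  induction l generalizing v with
  | nil => cases hx
  | cons y t ih =>
    simp only [List.foldl_cons]
    rcases List.mem_cons.1 hx with rfl | hxt
    · rw [if_pos hp]
      exact le_trans (pv_foldMin_le_init p g t _) (min_le_right _ _)
    · split_ifs with h
      · exact ih _ hxt
      · exact ih v hxt

theorem pv_foldMin_cases {α : Type} (p : α → Prop) [DecidablePred p] (g : α → Int) (l : List α) (v : Int) :
    l.foldl (fun a x => if p x then min a (g x) else a) v = v ∨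
      ∃ x ∈ l, p x ∧ l.foldl (fun a x => if p x then min a (g x) else a) v = g x := by
  induction l generalizing v with
  | nil => exact Or.inl rfl
  | cons y t ih =>
    simp only [List.foldl_cons]
    split_ifs with h
    · rcases ih (min v (g y)) with h1 | ⟨x, hx, hpx, hex⟩
      · rcases min_choice v (g y) with hm | hm
        · exact Or.inl (h1.trans hm)
        · exact Or.inr ⟨y, List.mem_cons_self, h, h1.trans hm⟩
      · exact Or.inr ⟨x, List.mem_cons_of_mem _ hx, hpx, hex⟩
    · rcases ih v with h1 | ⟨x, hx, hpx, hex⟩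
      · exact Or.inl h1
      · exact Or.inr ⟨x, List.mem_cons_of_mem _ hx, hpx, hex⟩

theorem pv_foldMin_eq {α β : Type} (p : α → Prop) [DecidablePred p] (g : α → Int) (l : List α)
    (q : β → Prop) [DecidablePred q] (h : β → Int) (m : List β) (v : Int)
    (H1 : ∀ x ∈ l, p x → ∃ y ∈ m, q y ∧ g x = h y)
    (H2 : ∀ y ∈ m, q y → ∃ x ∈ l, p x ∧ h y = g x) :
    l.foldl (fun a x => if p x then min a (g x) else a) v =
      m.foldl (fun a y => if q y then min a (h y) else a) v := by
  apply le_antisymm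
  · rcases pv_foldMin_cases q h m v with he | ⟨y, hy, hqy, he⟩
    · rw [he]; exact pv_foldMin_le_init p g l v
    · rw [he]
      obtain ⟨x, hx, hpx, hxy⟩ := H2 y hy hqy
      rw [hxy]
      exact pv_foldMin_le_mem p g l v x hx hpx
  · rcases pv_foldMin_cases p g l v with he | ⟨x, hx, hpx, he⟩
    · rw [he]; exact pv_foldMin_le_init q h m v
    · rw [he]
      obtain ⟨y, hy, hqy, hxy⟩ := H1 x hx hpx
      rw [hxy]
      exact pv_foldMin_le_mem q h m v y hy hqy

-- dp-array set/get toolkit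
theorem pv_get_set_self (dp : List Int) (i : Int) (a : Int) (h0 : 0 ≤ i) (h1 : i < (dp.length : Int)) :
    PySem.List.pyGetD (PySem.List.pySetD dp i a) i 0 = a := by
  rw [PySem.List.pySetD_of_nonneg _ _ h0,
    PySem.List.pyGetD_eq_getElem _ _ h0 (by simpa using h1)]
  exact List.getElem_set_self (by simpa using by omega)

theorem pv_get_set_ne (dp : List Int) (i j : Int) (a : Int) (h0 : 0 ≤ i) (hj : 0 ≤ j)
    (hj2 : j < (dp.length : Int)) (hne : j ≠ i) :
    PySem.List.pyGetD (PySem.List.pySetD dp i a) j 0 = PySem.List.pyGetD dp j 0 := by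
  rw [PySem.List.pySetD_of_nonneg _ _ h0,
    PySem.List.pyGetD_eq_getElem _ _ hj (by simpa using hj2),
    PySem.List.pyGetD_eq_getElem _ _ hj hj2]
  apply List.getElem_set_ne
  omega

theorem pv_set_set (dp : List Int) (i : Int) (a b : Int) (h0 : 0 ≤ i) :
    PySem.List.pySetD (PySem.List.pySetD dp i a) i b = PySem.List.pySetD dp i b := by
  rw [PySem.List.pySetD_of_nonneg _ _ h0, PySem.List.pySetD_of_nonneg _ _ h0,
    PySem.List.pySetD_of_nonneg _ _ h0, List.set_set]

theorem pv_strlen_nonneg (w : String) : 0 ≤ PySem.Str.len w := by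
  rw [PySem.Str.len_eq]; positivity

-- A's inner loop, rephrased from updating dp[i] in place to folding an accumulator
theorem pv_arrA (sentence : String) (i : Int) (dp : List Int) (h0 : 0 ≤ i) (h1 : i < (dp.length : Int))
    (ws : List String) : ∀ a : Int,
    List.foldl (fun dp w =>
        if PySem.Str.len w ≤ i ∧ PySem.Str.slice sentence (some (i - PySem.Str.len w)) (some i) = w then
          PySem.List.pySetD dp i (min (PySem.List.pyGetD dp i 0) (PySem.List.pyGetD dp (i - PySem.Str.len w) 0))
        else dp)
      (PySem.List.pySetD dp i a) ws
    = PySem.List.pySetD dp i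
        (List.foldl (fun a w =>
          if PySem.Str.len w ≤ i ∧ PySem.Str.slice sentence (some (i - PySem.Str.len w)) (some i) = w then
            min a (if PySem.Str.len w = 0 then a else PySem.List.pyGetD dp (i - PySem.Str.len w) 0)
          else a) a ws) := by
  induction ws with
  | nil => intro a; rfl
  | cons w t ih =>
    intro a
    simp only [List.foldl_cons]
    by_cases hc : PySem.Str.len w ≤ i ∧ PySem.Str.slice sentence (some (i - PySem.Str.len w)) (some i) = w
    · rw [if_pos hc, if_pos hc]
      have hget : PySem.List.pyGetD (PySem.List.pySetD dp i a) i 0 = a := pv_get_set_self dp i a h0 h1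
      by_cases hw : PySem.Str.len w = 0
      · rw [if_pos hw]
        have heq : i - PySem.Str.len w = i := by omega
        rw [heq, hget, pv_set_set dp i a (min a a) h0, min_self]
        exact ih a
      · rw [if_neg hw]
        have hlw : 0 ≤ PySem.Str.len w := pv_strlen_nonneg w
        have hne : i - PySem.Str.len w ≠ i := by omega
        rw [hget, pv_get_set_ne dp i (i - PySem.Str.len w) a h0 (by omega) (by omega) hne,
          pv_set_set dp i a _ h0]
        exact ih _
    · rw [if_neg hc, if_neg hc]
      exact ih a

-- the accumulator fold with the degenerate empty word filtered into the guard
theorem pv_accA_filter (sentence : String) (i : Int) (dp : List Int) (ws : List String) (a : Int) :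
    List.foldl (fun a w =>
        if PySem.Str.len w ≤ i ∧ PySem.Str.slice sentence (some (i - PySem.Str.len w)) (some i) = w then
          min a (if PySem.Str.len w = 0 then a else PySem.List.pyGetD dp (i - PySem.Str.len w) 0)
        else a) a ws
    = List.foldl (fun a w =>
        if 1 ≤ PySem.Str.len w ∧ PySem.Str.len w ≤ i ∧ PySem.Str.slice sentence (some (i - PySem.Str.len w)) (some i) = w then
          min a (PySem.List.pyGetD dp (i - PySem.Str.len w) 0)
        else a) a ws := by
  apply PySem.List.foldl_congr_mem
  intro acc w _
  by_cases hw : PySem.Str.len w = 0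
  · rw [if_pos hw, min_self, hw]
    norm_num
  · have hlw := pv_strlen_nonneg w
    rw [if_neg hw]
    by_cases hc : PySem.Str.len w ≤ i ∧ PySem.Str.slice sentence (some (i - PySem.Str.len w)) (some i) = w
    · rw [if_pos hc, if_pos ⟨by omega, hc.1, hc.2⟩]
    · rw [if_neg hc, if_neg (by tauto)]

theorem pv_slice_len (sentence : String) (i L : Int) (h1 : 1 ≤ L) (h2 : L ≤ i)
    (h3 : i ≤ PySem.Str.len sentence) :
    PySem.Str.len (PySem.Str.slice sentence (some (i - L)) (some i)) = L := by
  rw [PySem.Str.len_eq, PySem.Str.toList_slice, PySem.Chars.slice_eq_listSlice]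
  rw [PySem.Str.len_eq] at h3
  rw [PySem.List.slice_of_nonneg _ (by omega) (by omega) (by omega) h3]
  simp only [List.length_take, List.length_drop]
  omega

theorem pv_maxlen_le (dictionary : List String) (w : String) (hw : w ∈ dictionary) :
    PySem.Str.len w ≤ List.foldl (fun m w => max m (PySem.Str.len w)) 0 dictionary := by
  have hrw : List.foldl (fun m w => max m (PySem.Str.len w)) 0 dictionary
      = List.foldl max 0 (dictionary.map PySem.Str.len) := by rw [List.foldl_map]
  rw [hrw]
  exact (PySem.List.le_foldl_max (dictionary.map PySem.Str.len) 0).2 _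
    (List.mem_map_of_mem hw)

theorem pv_step_eq (dictionary : List String) (sentence : String) (i : Int) (dp : List Int)
    (hi1 : 1 ≤ i) (hi2 : i ≤ PySem.Str.len sentence) (hdp : (dp.length : Int) = PySem.Str.len sentence + 1) :
    pvStepA dictionary sentence dp i = pvStepB dictionary sentence dp i := by
  unfold pvStepA pvStepB
  have hlen : i < (dp.length : Int) := by omega
  rw [pv_arrA sentence i dp (by omega) hlen dictionary _]
  congr 1
  rw [pv_accA_filter]
  apply pv_foldMin_eq
    (p := fun w => 1 ≤ PySem.Str.len w ∧ PySem.Str.len w ≤ i ∧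
      PySem.Str.slice sentence (some (i - PySem.Str.len w)) (some i) = w)
    (g := fun w => PySem.List.pyGetD dp (i - PySem.Str.len w) 0)
    (q := fun L => PySem.Set.contains (PySem.Set.ofList dictionary)
      (PySem.Str.slice sentence (some (i - L)) (some i)) = true)
    (h := fun L => PySem.List.pyGetD dp (i - L) 0)
  · intro w hw hp
    obtain ⟨hp1, hp2, hp3⟩ := hp
    have hml := pv_maxlen_le dictionary w hw
    refine ⟨PySem.Str.len w, ?_, ?_, rfl⟩
    · rw [PySem.List.mem_pyRange_one]
      omega
    · rw [hp3, PySem.Set.contains_iff]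
      exact (PySem.Set.mem_ofList _ _).2 hw
  · intro L hL hq
    rw [PySem.List.mem_pyRange_one] at hL
    have hLi : L ≤ i := by omega
    have hwmem : PySem.Str.slice sentence (some (i - L)) (some i) ∈ dictionary :=
      (PySem.Set.mem_ofList _ _).1 ((PySem.Set.contains_iff _ _).1 hq)
    have hlenS := pv_slice_len sentence i L hL.1 hLi hi2
    exact ⟨_, hwmem, ⟨by rw [hlenS]; exact hL.1, by rw [hlenS]; exact hLi, by rw [hlenS]⟩,
      by rw [hlenS]⟩

theorem pv_len_stepB (dictionary : List String) (sentence : String) (dp : List Int) (i : Int) :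
    (pvStepB dictionary sentence dp i).length = dp.length := by
  simp [pvStepB, PySem.List.length_pySetD]

theorem pv_outer (dictionary : List String) (sentence : String) : ∀ (l : List Int) (dp : List Int),
    (∀ i ∈ l, 1 ≤ i ∧ i ≤ PySem.Str.len sentence) → (dp.length : Int) = PySem.Str.len sentence + 1 →
    l.foldl (pvStepA dictionary sentence) dp = l.foldl (pvStepB dictionary sentence) dp := by
  intro l
  induction l with
  | nil => intro dp _ _; rfl
  | cons i t ih =>
    intro dp hmem hdp
    simp only [List.foldl_cons]
    rw [pv_step_eq dictionary sentence i dp (hmem i List.mem_cons_self).1 (hmem i List.mem_cons_self).2 hdp]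
    exact ih _ (fun j hj => hmem j (List.mem_cons_of_mem _ hj))
      (by rw [pv_len_stepB]; exact hdp)

-- B on an empty sentence
theorem pv_alt_zero (dictionary : List String) (sentence : String) (h0 : PySem.Str.len sentence = 0) :
    respace2_alt dictionary sentence = 0 := by
  simp only [respace2_alt, h0]
  rw [PySem.List.pyRange_one_eq_nil (by norm_num), List.foldl_nil,
    PySem.List.pyRepeat_singleton]
  norm_num

-- B with an empty dictionary counts every character
theorem pv_nil_fold (n : Nat) : ∀ k : Nat, k ≤ n →
    (((PySem.List.pyRange 1 ((k : Int) + 1)).foldl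
        (fun dp i => PySem.List.pySetD dp i (PySem.List.pyGetD dp (i - 1) 0 + 1))
        (List.replicate (n + 1) (0 : Int))).length = n + 1)
    ∧ ∀ j : Nat,
        ((PySem.List.pyRange 1 ((k : Int) + 1)).foldl
          (fun dp i => PySem.List.pySetD dp i (PySem.List.pyGetD dp (i - 1) 0 + 1))
          (List.replicate (n + 1) (0 : Int))).getD j 0 = if 1 ≤ j ∧ j ≤ k then (j : Int) else 0 := by
  intro k
  induction k with
  | zero =>
    intro _
    rw [show ((0 : Nat) : Int) + 1 = 1 by norm_num, PySem.List.pyRange_one_eq_nil le_rfl,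
      List.foldl_nil]
    refine ⟨by simp, fun j => ?_⟩
    rw [if_neg (by omega)]
    simp [List.getD, List.getElem?_replicate]
    split_ifs <;> rfl
  | succ k ih =>
    intro hk
    obtain ⟨ihlen, ihget⟩ := ih (by omega)
    rw [show ((k + 1 : Nat) : Int) + 1 = ((k : Int) + 1) + 1 by push_cast; ring,
      PySem.List.pyRange_one_succ_right (by omega), List.foldl_append, List.foldl_cons,
      List.foldl_nil]
    set dpk := (PySem.List.pyRange 1 ((k : Int) + 1)).foldl
      (fun dp i => PySem.List.pySetD dp i (PySem.List.pyGetD dp (i - 1) 0 + 1))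
      (List.replicate (n + 1) (0 : Int)) with hdpk
    have hread : PySem.List.pyGetD dpk ((k : Int) + 1 - 1) 0 = (k : Int) := by
      rw [show (k : Int) + 1 - 1 = ((k : Nat) : Int) by ring, PySem.List.pyGetD_natCast, ihget k]
      split_ifs with h
      · rfl
      · have : k = 0 := by omega
        simp [this]
    rw [hread, PySem.List.pySetD_of_nonneg _ _ (by omega)]
    have htn : ((k : Int) + 1).toNat = k + 1 := by omega
    rw [htn]
    constructor
    · rw [List.length_set, ihlen]
    · intro j
      have hkn : k + 1 < dpk.length := by omega
      rw [List.getD_eq_getElem?_getD, List.getElem?_set]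
      by_cases hj : k + 1 = j
      · subst hj
        rw [if_pos rfl, if_pos hkn, Option.getD_some, if_pos (by omega)]
        push_cast
        ring
      · rw [if_neg hj, ← List.getD_eq_getElem?_getD, ihget j]
        split_ifs with h1 h2 h2 <;> try rfl
        · omega
        · omega

theorem pv_alt_nil (sentence : String) : respace2_alt [] sentence = PySem.Str.len sentence := by
  simp only [respace2_alt]
  have hstep : (fun (dp : List Int) (i : Int) => PySem.List.pySetD dp i
        ((PySem.List.pyRange 1 (min i (List.foldl (fun m w => max m (PySem.Str.len w)) 0 ([] : List String)) + 1)).foldl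
          (fun best L =>
            if PySem.Set.contains (PySem.Set.ofList ([] : List String))
                (PySem.Str.slice sentence (some (i - L)) (some i)) then
              min best (PySem.List.pyGetD dp (i - L) 0)
            else best)
          (PySem.List.pyGetD dp (i - 1) 0 + 1)))
      = fun (dp : List Int) (i : Int) => PySem.List.pySetD dp i (PySem.List.pyGetD dp (i - 1) 0 + 1) := by
    funext dp i
    congr 1
    have : ∀ x, PySem.Set.contains (PySem.Set.ofList ([] : List String)) x = false := by
      intro x; rfl
    simp only [this, Bool.false_eq_true, if_false]
    exact List.foldl_fixed _
  rw [hstep, PySem.List.pyRepeat_singleton, PySem.Str.len_eq]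
  have htn : ((sentence.toList.length : Int) + 1).toNat = sentence.toList.length + 1 := by omega
  rw [htn]
  obtain ⟨hlen, hget⟩ := pv_nil_fold sentence.toList.length sentence.toList.length le_rfl
  rw [PySem.List.pyGetD_natCast, hget]
  split_ifs with h
  · rfl
  · have : sentence.toList.length = 0 := by omega
    simp [this]

-- ===== VERDICT (by name: the statement is the Claim_ definition above) =====
theorem pv_len_foldB (dictionary : List String) (sentence : String) :
    ∀ (l : List Int) (dp : List Int),
    (l.foldl (pvStepB dictionary sentence) dp).length = dp.length := by
  intro l
  induction l with
  | nil => intro dp; rfl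
  | cons i t ih => intro dp; rw [List.foldl_cons, ih, pv_len_stepB]

theorem respace2_spec : Claim_equal_respace2 := by
  intro dictionary sentence _
  unfold Spec_respace2
  by_cases h0 : PySem.Str.len sentence = 0
  · rw [pv_alt_zero dictionary sentence h0]
    simp only [respace2]
    rw [if_pos h0]
  · by_cases hd : dictionary = []
    · subst hd
      rw [pv_alt_nil]
      simp only [respace2]
      rw [if_neg h0, if_pos (by norm_num)]
    · have hn1 : 1 ≤ PySem.Str.len sentence := by
        have := pv_strlen_nonneg sentence; omega
      have hdlen : ¬ ((dictionary.length : Int) = 0) := by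
        simp [List.length_eq_zero_iff, hd]
      simp only [respace2]
      rw [if_neg h0, if_neg hdlen]
      show PySem.List.pyGetD
          ((PySem.List.pyRange 1 (PySem.Str.len sentence + 1)).foldl (pvStepA dictionary sentence)
            (PySem.List.pyRepeat [0] (PySem.Str.len sentence + 1))) (-1) 0
        = respace2_alt dictionary sentence
      have hdp0len : (((PySem.List.pyRepeat [0] (PySem.Str.len sentence + 1)) : List Int).length : Int)
          = PySem.Str.len sentence + 1 := by
        rw [PySem.List.pyRepeat_singleton, List.length_replicate]; omega
      rw [pv_outer dictionary sentence _ _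
        (fun i hi => by rw [PySem.List.mem_pyRange_one] at hi; omega) hdp0len]
      show _ = PySem.List.pyGetD
          ((PySem.List.pyRange 1 (PySem.Str.len sentence + 1)).foldl (pvStepB dictionary sentence)
            (PySem.List.pyRepeat [0] (PySem.Str.len sentence + 1))) (PySem.Str.len sentence) 0
      set dp := (PySem.List.pyRange 1 (PySem.Str.len sentence + 1)).foldl
        (pvStepB dictionary sentence) (PySem.List.pyRepeat [0] (PySem.Str.len sentence + 1)) with hdp
      have hlen : (dp.length : Int) = PySem.Str.len sentence + 1 := by
        rw [hdp, pv_len_foldB]; exact hdp0len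
      have hne : dp ≠ [] := by
        intro h
        rw [h] at hlen
        simp only [List.length_nil, Nat.cast_zero] at hlen
        omega
      rw [PySem.List.pyGetD_neg_one _ _ hne, List.getLast_eq_getElem,
        PySem.List.pyGetD_eq_getElem _ _ (by omega) (by omega)]
      congr 1
      omega
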